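-- pv_equiv track=rewrite | github.com/Celinatrix/PYTHON- | Quizz 2.py | move_spaces_to_front
-- ===== SOURCE A (Python) =====
-- def move_spaces_to_front(text):
--     spaces = ""
--     non_spaces = ""
--
--     for char in text:
--         if char == ' ':
--             spaces += char
--         else:
--             non_spaces += char
--
--     return spaces + non_spaces
-- ===== SOURCE B (Python) =====
-- def move_spaces_to_front(text):
--     return ''.join(sorted(text, key=lambda c: c != ' '))
-- ===== Notes on version B (the rewrite author's own statement) =====
-- stated objective: idiomatic
-- what changed: Replaces the two-accumulator partition loop by a single stable-sort expression keyed on (c != ' '), so spaces (key False) come first and order within each group is preserved by sort stability.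
import Mathlib
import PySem

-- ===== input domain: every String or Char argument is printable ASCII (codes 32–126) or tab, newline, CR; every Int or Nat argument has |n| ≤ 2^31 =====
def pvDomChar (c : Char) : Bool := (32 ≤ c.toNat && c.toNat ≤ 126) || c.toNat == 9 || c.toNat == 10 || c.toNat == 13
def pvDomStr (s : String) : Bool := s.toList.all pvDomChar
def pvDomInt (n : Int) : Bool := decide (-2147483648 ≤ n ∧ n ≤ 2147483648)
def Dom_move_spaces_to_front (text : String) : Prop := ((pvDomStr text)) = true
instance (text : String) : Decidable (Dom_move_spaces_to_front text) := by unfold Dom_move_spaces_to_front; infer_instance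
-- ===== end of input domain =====

-- B replaces A's two-accumulator partition loop by one stable sort keyed on (c ≠ ' '); idiomatic, return value identical.

-- ===== PORT A =====
-- A builds two strings (spaces, non_spaces) in one pass and concatenates them.
def move_spaces_to_front (text : String) : String :=
  let st := text.toList.foldl
    (fun (st : List Char × List Char) c =>
      if c = ' ' then (st.1 ++ [c], st.2) else (st.1, st.2 ++ [c]))
    ([], [])
  String.mk (st.1 ++ st.2)

-- ===== PORT B =====
-- B: ''.join(sorted(text, key=lambda c: c != ' '))
def move_spaces_to_front_alt (text : String) : String :=
  String.mk (PySem.List.sorted text.toList (fun c => decide (c ≠ ' ')) false)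

-- ===== PRECONDITION & SPEC =====
def Spec_move_spaces_to_front (text : String) (out : String) : Prop := out = move_spaces_to_front_alt text
instance (text : String) (out : String) : Decidable (Spec_move_spaces_to_front text out) := by unfold Spec_move_spaces_to_front; infer_instance

-- ===== CLAIM (what is proved, stated in full; the proofs are below) =====
def Claim_equal_move_spaces_to_front : Prop := ∀ (text : String), Dom_move_spaces_to_front text → Spec_move_spaces_to_front text (move_spaces_to_front text)

-- ===== LEMMAS AND PROOFS =====

-- Inserting x after every element it is not 'before' appends it at the end.
theorem insertBy_append {α : Type} (before : α → α → Bool) (x : α) (L : List α)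
    (h : ∀ a ∈ L, before x a = false) :
    PySem.List.insertBy before x L = L ++ [x] := by
  induction L with
  | nil => rfl
  | cons y ys ih =>
    simp only [PySem.List.insertBy, h y (by simp)]
    simp [ih (fun a ha => h a (by simp [ha]))]

-- Stable insertion of a false-key element into (falses ++ trues) lands at the end of the falses.
theorem insertBy_key_false {α : Type} (k : α → Bool) (x : α) (F T : List α)
    (hx : k x = false) (hF : ∀ a ∈ F, k a = false) (hT : ∀ a ∈ T, k a = true) :
    PySem.List.insertBy (fun a b => decide (k a < k b)) x (F ++ T)
      = (F ++ [x]) ++ T := by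
  induction F with
  | nil =>
    cases T with
    | nil => rfl
    | cons y ys =>
      simp only [List.nil_append, PySem.List.insertBy, hx, hT y (by simp)]
      simp
  | cons f fs ih =>
    have hf : k f = false := hF f (by simp)
    simp only [List.cons_append, PySem.List.insertBy, hx, hf]
    simp [ih (fun a ha => hF a (by simp [ha]))]

-- Invariant of the insertion-sort fold with a boolean key.
theorem sorted_bool_inv {α : Type} (k : α → Bool) (xs F T : List α)
    (hF : ∀ a ∈ F, k a = false) (hT : ∀ a ∈ T, k a = true) :
    xs.foldl (fun acc x => PySem.List.insertBy (fun a b => decide (k a < k b)) x acc) (F ++ T)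
      = (F ++ xs.filter (fun a => !k a)) ++ (T ++ xs.filter k) := by
  induction xs generalizing F T with
  | nil => simp
  | cons x xs ih =>
    cases hx : k x with
    | false =>
      have hF' : ∀ a ∈ F ++ [x], k a = false := by
        intro a ha
        rcases List.mem_append.mp ha with h | h
        · exact hF a h
        · simp at h; rw [h]; exact hx
      simp only [List.foldl_cons, insertBy_key_false k x F T hx hF hT]
      rw [ih (F ++ [x]) T hF' hT]
      simp [hx]
    | true =>
      have : PySem.List.insertBy (fun a b => decide (k a < k b)) x (F ++ T)
          = (F ++ T) ++ [x] := by
        apply insertBy_append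
        intro a ha
        cases h : k a <;> simp [hx]
      have hT' : ∀ a ∈ T ++ [x], k a = true := by
        intro a ha
        rcases List.mem_append.mp ha with h | h
        · exact hT a h
        · simp at h; rw [h]; exact hx
      simp only [List.foldl_cons, this]
      rw [List.append_assoc F T [x], ih F (T ++ [x]) hF hT']
      simp [hx]

-- B's stable sort is exactly 'spaces first, then non-spaces', each in original order.
theorem sorted_key_eq (xs : List Char) :
    PySem.List.sorted xs (fun c => decide (c ≠ ' ')) false
      = xs.filter (fun c => c = ' ') ++ xs.filter (fun c => c ≠ ' ') := by
  have := sorted_bool_inv (fun c => decide (c ≠ ' ')) xs [] []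
    (by simp) (by simp)
  simp only [List.nil_append, List.append_nil] at this
  simpa [PySem.List.sorted, List.filter_congr, decide_not] using this

-- A's fold computes the same two filters.
theorem asplit (xs F T : List Char) :
    xs.foldl (fun (st : List Char × List Char) c =>
        if c = ' ' then (st.1 ++ [c], st.2) else (st.1, st.2 ++ [c])) (F, T)
      = (F ++ xs.filter (fun c => c = ' '), T ++ xs.filter (fun c => c ≠ ' ')) := by
  induction xs generalizing F T with
  | nil => simp
  | cons x xs ih =>
    by_cases hx : x = ' ' <;> simp [hx, ih]

-- ===== VERDICT (by name: the statement is the Claim_ definition above) =====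
theorem move_spaces_to_front_spec : Claim_equal_move_spaces_to_front := by
  intro text _
  unfold Spec_move_spaces_to_front move_spaces_to_front move_spaces_to_front_alt
  rw [sorted_key_eq, asplit]
  simp
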